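-- pv_equiv track=rewrite | github.com/SvenMayer/adventofcode25 | challanges/day5/solution.py | find_valid_ids
-- ===== SOURCE A (Python) =====
-- def find_valid_ids(ranges, ids):
--     valid = []
--     for i, id_ in enumerate(ids):
--         for r in ranges:
--             if id_ in r:
--                 valid.append(id_)
--                 break
--     return valid
-- ===== SOURCE B (Python) =====
-- def find_valid_ids(ranges, ids):
--     members = set()
--     for r in ranges:
--         members.update(r)
--     return [id_ for id_ in ids if id_ in members]
-- ===== Notes on version B (the rewrite author's own statement) =====
-- stated objective: faster
-- what changed: B builds a hash set of all range members once and filters the ids against it, replacing A's per-id linear scan over every range.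
import Mathlib
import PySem

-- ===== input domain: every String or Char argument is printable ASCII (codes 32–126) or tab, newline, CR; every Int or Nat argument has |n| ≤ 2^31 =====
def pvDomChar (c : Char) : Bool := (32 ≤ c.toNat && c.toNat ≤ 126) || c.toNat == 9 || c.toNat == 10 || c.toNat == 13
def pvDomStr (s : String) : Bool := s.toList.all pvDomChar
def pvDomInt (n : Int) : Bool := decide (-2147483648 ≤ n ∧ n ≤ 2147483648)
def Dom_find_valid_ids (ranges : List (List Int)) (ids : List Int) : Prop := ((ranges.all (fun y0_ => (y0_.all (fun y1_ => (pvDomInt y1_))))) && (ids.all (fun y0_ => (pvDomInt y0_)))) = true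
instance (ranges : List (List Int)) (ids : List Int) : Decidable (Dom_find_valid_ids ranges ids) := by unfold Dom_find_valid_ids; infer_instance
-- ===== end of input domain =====

-- B replaces A's per-id scan over all ranges by one pre-built set of all range members (objective: faster).
-- ===== PORT A =====
-- inner 'for r in ranges: if id_ in r: ... break' — returns whether some range contains id_
def pvInnerHit (ranges : List (List Int)) (id_ : Int) : Bool :=
  match ranges with
  | [] => false
  | r :: rs => if id_ ∈ r then true else pvInnerHit rs id_

def find_valid_ids (ranges : List (List Int)) (ids : List Int) : List Int :=
  ids.foldl (fun valid id_ => if pvInnerHit ranges id_ then valid ++ [id_] else valid) []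

-- ===== PORT B =====
def find_valid_ids_alt (ranges : List (List Int)) (ids : List Int) : List Int :=
  let members : PySem.Set Int := ranges.foldl (fun s r => PySem.Set.update s r) PySem.Set.empty
  ids.filter (fun id_ => PySem.Set.contains members id_)

-- ===== PRECONDITION & SPEC =====
def Spec_find_valid_ids (ranges : List (List Int)) (ids : List Int) (out : List Int) : Prop := out = find_valid_ids_alt ranges ids
instance (ranges : List (List Int)) (ids : List Int) (out : List Int) : Decidable (Spec_find_valid_ids ranges ids out) := by unfold Spec_find_valid_ids; infer_instance

-- ===== CLAIM (what is proved, stated in full; the proofs are below) =====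
def Claim_equal_find_valid_ids : Prop := ∀ (ranges : List (List Int)) (ids : List Int), Dom_find_valid_ids ranges ids → Spec_find_valid_ids ranges ids (find_valid_ids ranges ids)

-- ===== LEMMAS AND PROOFS =====

-- ===== VERDICT (by name: the statement is the Claim_ definition above) =====
theorem pv_mem_foldl_update {y : Int} (ranges : List (List Int)) (s : PySem.Set Int) :
    y ∈ ranges.foldl (fun s r => PySem.Set.update s r) s ↔ y ∈ s ∨ ∃ r ∈ ranges, y ∈ r := by
  induction ranges generalizing s with
  | nil => simp
  | cons r rs ih =>
    simp [List.foldl, ih, PySem.Set.mem_update]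
    tauto

theorem pv_innerHit_iff (ranges : List (List Int)) (id_ : Int) :
    pvInnerHit ranges id_ = true ↔ ∃ r ∈ ranges, id_ ∈ r := by
  induction ranges with
  | nil => simp [pvInnerHit]
  | cons r rs ih =>
    by_cases h : id_ ∈ r <;> simp [pvInnerHit, h, ih]

theorem find_valid_ids_spec : Claim_equal_find_valid_ids := by
  intro ranges ids _
  unfold Spec_find_valid_ids find_valid_ids find_valid_ids_alt
  rw [PySem.List.foldl_append_if_eq_filter]
  simp only [List.nil_append]
  apply List.filter_congr
  intro id_ _
  rw [Bool.eq_iff_iff, pv_innerHit_iff, PySem.Set.contains_iff, pv_mem_foldl_update]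
  simp [PySem.Set.empty]
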